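-- pv_equiv track=rewrite | github.com/cfusting/arctic-browning | utilities/learning_data.py | get_variable_type_indices
-- ===== SOURCE A (Python) =====
-- def get_variable_type_indices(days):
--     indices = []
--     previous = 0
--     for i in days:
--         current = previous + len(i)
--         if len(i) != 0:
--             indices.append(current - 1)
--             previous = current
--     return indices
-- ===== SOURCE B (Python) =====
-- def get_variable_type_indices(days):
--     t = sum(len(i) for i in days)
--     out = []
--     for i in reversed(days):
--         if i:
--             out.append(t - 1)
--         t -= len(i)
--     out.reverse()
--     return out
-- ===== Notes on version B (the rewrite author's own statement) =====
-- stated objective: alternative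
-- what changed: B traverses the list in the opposite direction: it computes the grand total of lengths once, then walks days in reverse subtracting each length from a descending counter, emitting total-1 at nonempty groups and building the output back-to-front, instead of A's forward running-sum accumulation.
import Mathlib
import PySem

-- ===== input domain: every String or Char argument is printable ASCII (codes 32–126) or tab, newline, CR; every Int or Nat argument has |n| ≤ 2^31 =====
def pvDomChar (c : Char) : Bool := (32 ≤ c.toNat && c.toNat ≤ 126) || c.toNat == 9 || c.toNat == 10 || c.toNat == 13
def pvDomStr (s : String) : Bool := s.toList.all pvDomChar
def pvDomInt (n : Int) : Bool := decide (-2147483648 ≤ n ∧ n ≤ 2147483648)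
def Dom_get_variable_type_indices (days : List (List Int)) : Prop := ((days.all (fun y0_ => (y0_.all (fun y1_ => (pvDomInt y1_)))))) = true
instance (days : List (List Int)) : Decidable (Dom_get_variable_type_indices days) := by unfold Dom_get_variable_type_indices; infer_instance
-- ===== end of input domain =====

-- B traverses in the opposite direction: grand total first, then a reverse walk with a
-- descending counter, building the output back-to-front (alternative decomposition).

-- ===== PORT A =====
def get_variable_type_indices (days : List (List Int)) : List Int :=
  (days.foldl (fun (st : List Int × Int) i =>
      let current := st.2 + (i.length : Int)
      if (i.length : Int) ≠ 0 then (st.1 ++ [current - 1], current) else st)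
    ([], 0)).1

-- ===== PORT B =====
def get_variable_type_indices_alt (days : List (List Int)) : List Int :=
  let t : Int := days.foldl (fun s i => s + (i.length : Int)) 0
  let st := days.reverse.foldl (fun (st : List Int × Int) i =>
      ((if i ≠ [] then st.1 ++ [st.2 - 1] else st.1), st.2 - (i.length : Int)))
    ([], t)
  st.1.reverse

-- ===== PRECONDITION & SPEC =====
def Spec_get_variable_type_indices (days : List (List Int)) (out : List Int) : Prop := out = get_variable_type_indices_alt days
instance (days : List (List Int)) (out : List Int) : Decidable (Spec_get_variable_type_indices days out) := by unfold Spec_get_variable_type_indices; infer_instance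

-- ===== CLAIM (what is proved, stated in full; the proofs are below) =====
def Claim_equal_get_variable_type_indices : Prop := ∀ (days : List (List Int)), Dom_get_variable_type_indices days → Spec_get_variable_type_indices days (get_variable_type_indices days)

-- ===== LEMMAS AND PROOFS =====

-- canonical description: end-1 of each nonempty group, prefix sums started at p
def pvG : List (List Int) → Int → List Int
  | [], _ => []
  | i :: r, p =>
      if (i.length : Int) ≠ 0 then (p + i.length - 1) :: pvG r (p + i.length)
      else pvG r (p + i.length)

-- total of lengths
def pvS : List (List Int) → Int
  | [] => 0
  | i :: r => (i.length : Int) + pvS r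

theorem pvS_snoc (xs : List (List Int)) (i : List Int) :
    pvS (xs ++ [i]) = pvS xs + i.length := by
  induction xs with
  | nil => simp [pvS]
  | cons j r ih => simp [pvS, ih]; ring

theorem pvS_reverse (xs : List (List Int)) : pvS xs.reverse = pvS xs := by
  induction xs with
  | nil => rfl
  | cons j r ih => simp [pvS, List.reverse_cons, pvS_snoc, ih]; ring

theorem pvS_foldl (xs : List (List Int)) : ∀ a : Int,
    xs.foldl (fun s i => s + (i.length : Int)) a = a + pvS xs := by
  induction xs with
  | nil => intro a; simp [pvS]
  | cons j r ih => intro a; simp [pvS, ih]; ring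

theorem pvG_snoc (ys : List (List Int)) (i : List Int) : ∀ p : Int,
    pvG (ys ++ [i]) p
      = pvG ys p ++ (if (i.length : Int) ≠ 0 then [p + pvS ys + i.length - 1] else []) := by
  induction ys with
  | nil => intro p; by_cases h : (i.length : Int) ≠ 0 <;> simp [pvG, pvS, h]
  | cons j r ih =>
      intro p
      by_cases h : (j.length : Int) ≠ 0 <;>
        simp [pvG, pvS, h, ih (p + (j.length : Int))] <;>
        split_ifs <;> simp_all <;> ring_nf
-- A's loop invariant
theorem pv_A_inv (days : List (List Int)) : ∀ (acc : List Int) (prev : Int),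
    (days.foldl (fun (st : List Int × Int) i =>
        let current := st.2 + (i.length : Int)
        if (i.length : Int) ≠ 0 then (st.1 ++ [current - 1], current) else st)
      (acc, prev)).1 = acc ++ pvG days prev := by
  induction days with
  | nil => simp [pvG]
  | cons i rest ih =>
      intro acc prev
      by_cases h : (i.length : Int) ≠ 0
      · simp only [List.foldl_cons, pvG, if_pos h]
        rw [ih]; simp
      · have h0 : (i.length : Int) = 0 := by omega
        simp only [List.foldl_cons, pvG, h0, add_zero]
        exact ih acc prev

-- B's loop invariant: the reverse walk with descending counter produces pvG reversed
theorem pv_B_inv (xs : List (List Int)) : ∀ (out : List Int) (t : Int),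
    (xs.foldl (fun (st : List Int × Int) i =>
        ((if i ≠ [] then st.1 ++ [st.2 - 1] else st.1), st.2 - (i.length : Int)))
      (out, t)).1 = out ++ (pvG xs.reverse (t - pvS xs)).reverse := by
  induction xs with
  | nil => intro out t; simp [pvG, pvS]
  | cons i rest ih =>
      intro out t
      simp only [List.foldl_cons, List.reverse_cons, pvS]
      rw [ih, pvG_snoc]
      by_cases h : i = []
      · have h0 : (i.length : Int) = 0 := by simp [h]
        simp [h]
      · have h0 : (i.length : Int) ≠ 0 := by
          simpa [List.length_eq_zero_iff] using h
        have harg : t - ((i.length : Int) + pvS rest) = t - i.length - pvS rest := by ring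
        simp [h, harg, pvS_reverse]

theorem get_variable_type_indices_spec : Claim_equal_get_variable_type_indices := by
  intro days _
  unfold Spec_get_variable_type_indices get_variable_type_indices get_variable_type_indices_alt
  simp only []
  rw [pv_A_inv, pv_B_inv, pvS_foldl, pvS_reverse, List.reverse_reverse]
  simp
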